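-- pv_equiv track=rewrite | github.com/rbaltrusch/natscript | interpreter/util/pattern_matching.py | determine_distances_between_patterns
-- ===== SOURCE A (Python) =====
-- from collections import defaultdict
-- from typing import DefaultDict
-- from typing import Dict
-- from typing import Hashable
-- from typing import List
--
-- DiffDict = Dict[Hashable, DefaultDict[int, List[int]]]
--
-- def determine_distances_between_patterns(elements: List[Hashable]) -> DiffDict:
--     """Returns a dict mapping of element to a mapping of {
--         length between same element occurence:
--         list of indices at starting indices at which element occured
--     }.
--     """
--     indices: DefaultDict[Hashable, List[int]] = defaultdict(list)
--     for i, element in enumerate(elements):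
--         indices[element].append(i)
--
--     differences: DiffDict = {element: defaultdict(list) for element in elements}
--     for element, pattern in indices.items():
--         if len(pattern) < 2:
--             continue
--
--         for current, previous in zip(pattern[1:], pattern):
--             diff = current - previous
--             differences[element][diff].append(previous)
--     return differences
-- ===== SOURCE B (Python) =====
-- from collections import defaultdict
--
-- def determine_distances_between_patterns(elements):
--     """Single pass: keep only the last index seen per element and update the
--     per-element diff dict as each recurrence arrives."""
--     differences = {}
--     last = {}
--     for i, element in enumerate(elements):
--         if element in last:
--             diff = i - last[element]
--             differences[element][diff].append(last[element])
--         else: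
--             differences[element] = defaultdict(list)
--         last[element] = i
--     return differences
-- ===== Notes on version B (the rewrite author's own statement) =====
-- stated objective: simpler
-- what changed: Replaces A's three phases (build full index lists per element, pre-create all entries by comprehension, then a nested loop over zipped index pairs) by one pass over enumerate that keeps only the last index seen per element and updates the diff dict on each recurrence.
import Mathlib
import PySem

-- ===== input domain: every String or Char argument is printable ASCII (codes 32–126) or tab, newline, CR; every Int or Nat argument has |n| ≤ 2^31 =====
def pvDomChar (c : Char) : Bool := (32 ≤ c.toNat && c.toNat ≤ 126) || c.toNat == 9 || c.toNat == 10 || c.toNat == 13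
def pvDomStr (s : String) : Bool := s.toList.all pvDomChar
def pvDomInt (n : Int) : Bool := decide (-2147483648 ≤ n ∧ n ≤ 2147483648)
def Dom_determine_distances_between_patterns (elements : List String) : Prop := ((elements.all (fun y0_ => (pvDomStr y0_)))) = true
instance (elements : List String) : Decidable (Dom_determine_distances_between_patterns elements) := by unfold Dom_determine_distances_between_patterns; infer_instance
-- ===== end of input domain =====

-- B replaces A's three phases by a single pass that keeps only the last index seen per element (simpler decomposition, same cost).

-- ===== PORT A =====
-- literal port of A: phase 1 groups indices per element, phase 2 pre-creates an
-- empty inner dict per element (the dict comprehension: overwrites keep position),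
-- phase 3 fills diffs from consecutive index pairs
-- (pattern[1:] on a list is pattern.drop 1, exact).
def determine_distances_between_patterns (elements : List String) : List (String × List (Int × List Int)) :=
  let indices : PySem.Dict String (List Int) :=
    (PySem.List.enumerate elements).foldl
      (fun d p => d.modify p.2 [] (fun l => l ++ [p.1])) PySem.Dict.empty
  let differences0 : PySem.Dict String (PySem.Dict Int (List Int)) :=
    elements.foldl (fun d e => d.insert e PySem.Dict.empty) PySem.Dict.empty
  let differences :=
    indices.items.foldl
      (fun diffs ep =>
        if ep.2.length < 2 then diffs
        else ((ep.2.drop 1).zip ep.2).foldl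
          (fun diffs cp =>
            diffs.modify ep.1 PySem.Dict.empty
              (fun inner => inner.modify (cp.1 - cp.2) [] (fun l => l ++ [cp.2])))
          diffs)
      differences0
  differences.items.map (fun q => (q.1, q.2.items))

-- ===== PORT B =====
-- literal port of Source B: one fold over enumerate with state (differences, last)
def determine_distances_between_patterns_alt (elements : List String) : List (String × List (Int × List Int)) :=
  let st :=
    (PySem.List.enumerate elements).foldl
      (fun (st : PySem.Dict String (PySem.Dict Int (List Int)) × PySem.Dict String Int) p =>
        match st.2.get? p.2 with
        | some j =>
            (st.1.modify p.2 PySem.Dict.empty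
               (fun inner => inner.modify (p.1 - j) [] (fun l => l ++ [j])),
             st.2.insert p.2 p.1)
        | none => (st.1.insert p.2 PySem.Dict.empty, st.2.insert p.2 p.1))
      (PySem.Dict.empty, PySem.Dict.empty)
  st.1.items.map (fun q => (q.1, q.2.items))

-- ===== PRECONDITION & SPEC =====
def Spec_determine_distances_between_patterns (elements : List String) (out : List (String × List (Int × List Int))) : Prop := out = determine_distances_between_patterns_alt elements
instance (elements : List String) (out : List (String × List (Int × List Int))) : Decidable (Spec_determine_distances_between_patterns elements out) := by unfold Spec_determine_distances_between_patterns; infer_instance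

-- ===== CLAIM (what is proved, stated in full; the proofs are below) =====
def Claim_equal_determine_distances_between_patterns : Prop := ∀ (elements : List String), Dom_determine_distances_between_patterns elements → Spec_determine_distances_between_patterns elements (determine_distances_between_patterns elements)

-- ===== LEMMAS AND PROOFS =====

-- the (Int) indices at which e occurs in xs
def pvOcc (xs : List String) (e : String) : List Int :=
  ((PySem.List.enumerate xs).filter (fun p => p.2 == e)).map (fun p => p.1)

-- fill d with the consecutive-pair diffs of pattern pat (A's inner loop shape)
def pvApply (pat : List Int) (d : PySem.Dict Int (List Int)) : PySem.Dict Int (List Int) :=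
  ((pat.drop 1).zip pat).foldl
    (fun dd cp => dd.modify (cp.1 - cp.2) [] (fun l => l ++ [cp.2])) d

def pvInner (pat : List Int) : PySem.Dict Int (List Int) := pvApply pat PySem.Dict.empty

-- the common reference value both programs compute
def pvModel (xs : List String) : List (String × List (Int × List Int)) :=
  (PySem.Set.ofList xs).map (fun e => (e, (pvInner (pvOcc xs e)).items))

-- B's loop body, named for the proofs (definitionally the lambda in the port)
def pvStepB (st : PySem.Dict String (PySem.Dict Int (List Int)) × PySem.Dict String Int)
    (p : Int × String) : PySem.Dict String (PySem.Dict Int (List Int)) × PySem.Dict String Int :=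
  match st.2.get? p.2 with
  | some j =>
      (st.1.modify p.2 PySem.Dict.empty
         (fun inner => inner.modify (p.1 - j) [] (fun l => l ++ [j])),
       st.2.insert p.2 p.1)
  | none => (st.1.insert p.2 PySem.Dict.empty, st.2.insert p.2 p.1)

-- A's phase-3 loop body, named for the proofs (definitionally the lambda in the port)
def pvStepA (diffs : PySem.Dict String (PySem.Dict Int (List Int))) (ep : String × List Int) :
    PySem.Dict String (PySem.Dict Int (List Int)) :=
  if ep.2.length < 2 then diffs
  else ((ep.2.drop 1).zip ep.2).foldl
    (fun diffs cp =>
      diffs.modify ep.1 PySem.Dict.empty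
        (fun inner => inner.modify (cp.1 - cp.2) [] (fun l => l ++ [cp.2])))
    diffs

theorem pvOcc_append (xs : List String) (x e : String) :
    pvOcc (xs ++ [x]) e = pvOcc xs e ++ (if x = e then [((xs.length : Int))] else []) := by
  simp [pvOcc, PySem.List.enumerate_append, PySem.List.enumerate_cons, List.filter_append]
  split_ifs with h
  · simp [h]
  · simp [beq_iff_eq, h]

theorem pvOcc_nil_iff (xs : List String) (e : String) : pvOcc xs e = [] ↔ e ∉ xs := by
  simp only [pvOcc, List.map_eq_nil_iff, List.filter_eq_nil_iff]
  constructor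
  · intro h hm
    obtain ⟨i, hi, rfl⟩ := List.mem_iff_getElem.mp hm
    exact h (0 + i, xs[i]) ((PySem.List.mem_enumerate_iff xs 0 _).mpr ⟨i, hi, rfl⟩) (by simp)
  · intro h p hp
    obtain ⟨k, hk, rfl⟩ := (PySem.List.mem_enumerate_iff xs 0 p).mp hp
    simp only [beq_iff_eq]
    intro hc; exact h (hc ▸ List.getElem_mem hk)

theorem pvInner_small (pat : List Int) (h : pat.length < 2) : pvInner pat = PySem.Dict.empty := by
  match pat, h with
  | [], _ => rfl
  | [a], _ => rfl

-- zipping ignores the longer tail of the second list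
theorem pv_zip_append_right (l1 l2 r : List Int) (h : l1.length ≤ l2.length) :
    l1.zip (l2 ++ r) = l1.zip l2 := by
  induction l1 generalizing l2 with
  | nil => simp
  | cons a t ih =>
    cases l2 with
    | nil => simp at h
    | cons b u => simp_all [List.zip]

theorem pvApply_append (pat : List Int) (n : Int) (h : pat ≠ []) (d : PySem.Dict Int (List Int)) :
    pvApply (pat ++ [n]) d =
      (pvApply pat d).modify (n - pat.getLast h) [] (fun l => l ++ [pat.getLast h]) := by
  unfold pvApply
  have h1 : (pat ++ [n]).drop 1 = pat.drop 1 ++ [n] := by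
    cases pat with
    | nil => exact absurd rfl h
    | cons a t => simp
  have hlen : (pat.drop 1).length = pat.dropLast.length := by
    simp [List.length_dropLast]
  have hz : (pat.drop 1).zip pat = (pat.drop 1).zip pat.dropLast := by
    calc (pat.drop 1).zip pat
        = (pat.drop 1).zip (pat.dropLast ++ [pat.getLast h]) := by
          rw [List.dropLast_append_getLast h]
      _ = (pat.drop 1).zip pat.dropLast :=
          pv_zip_append_right _ _ _ (le_of_eq hlen)
  have h2 : pat ++ [n] = pat.dropLast ++ [pat.getLast h, n] := by
    conv_lhs => rw [← List.dropLast_append_getLast h]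
    simp
  rw [h1, h2, List.zip_append hlen]
  simp only [List.zip, List.zipWith, List.foldl_append, List.foldl_cons, List.foldl_nil]
  simp only [List.zip] at hz
  rw [hz]

theorem pvInner_append (pat : List Int) (n : Int) (h : pat ≠ []) :
    pvInner (pat ++ [n]) =
      (pvInner pat).modify (n - pat.getLast h) [] (fun l => l ++ [pat.getLast h]) :=
  pvApply_append pat n h _

-- the invariant of B's single pass
theorem B_inv (xs : List String) :
    (((PySem.List.enumerate xs).foldl pvStepB
        (PySem.Dict.empty, PySem.Dict.empty)).1.keys = PySem.Set.ofList xs) ∧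
    (∀ e, ((PySem.List.enumerate xs).foldl pvStepB
        (PySem.Dict.empty, PySem.Dict.empty)).1.getD e PySem.Dict.empty
        = pvInner (pvOcc xs e)) ∧
    (∀ e, ((PySem.List.enumerate xs).foldl pvStepB
        (PySem.Dict.empty, PySem.Dict.empty)).2.get? e = (pvOcc xs e).getLast?) := by
  induction xs using List.reverseRecOn with
  | nil =>
    refine ⟨rfl, fun e => ?_, fun e => rfl⟩
    simp [pvOcc, PySem.List.enumerate, pvInner, pvApply, PySem.Dict.getD_empty]
  | append_singleton xs x ih =>
    obtain ⟨h1, h2, h3⟩ := ih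
    rw [PySem.List.enumerate_append] at *
    simp only [PySem.List.enumerate_cons, PySem.List.enumerate_nil, List.foldl_append,
      List.foldl_cons, List.foldl_nil] at *
    by_cases hx : x ∈ xs
    · have hne : pvOcc xs x ≠ [] := by rw [Ne, pvOcc_nil_iff]; simpa using hx
      have hlast := h3 x
      rw [List.getLast?_eq_some_getLast hne] at hlast
      simp only [pvStepB, hlast]
      have hcont : (((PySem.List.enumerate xs 0).foldl pvStepB (PySem.Dict.empty, PySem.Dict.empty)).1).contains x = true := by
        rw [PySem.Dict.contains_iff_mem_keys, h1, PySem.Set.mem_ofList]; exact hx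
      refine ⟨?_, fun e => ?_, fun e => ?_⟩
      · show (PySem.Dict.modify _ x _ _).keys = _
        rw [PySem.Dict.keys_modify, PySem.Dict.keys_insert_of_contains _ _ hcont, h1,
          PySem.Set.ofList_append_singleton,
          PySem.Set.add_of_mem ((PySem.Set.mem_ofList xs x).mpr hx)]
      · show (PySem.Dict.modify _ x _ _).getD e _ = _
        rw [PySem.Dict.getD_modify, pvOcc_append]
        by_cases he : e = x
        · subst he
          rw [if_pos rfl, if_pos rfl, h2, zero_add,
            pvInner_append _ _ hne]
        · rw [if_neg he, if_neg (fun hh => he hh.symm), List.append_nil, h2]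
      · show (PySem.Dict.insert _ x _).get? e = _
        rw [PySem.Dict.get?_insert, pvOcc_append]
        by_cases he : e = x
        · subst he
          rw [if_pos rfl, if_pos rfl, List.getLast?_concat, zero_add]
        · rw [if_neg he, if_neg (fun hh => he hh.symm), List.append_nil, h3]
    · have hnone : (pvOcc xs x) = [] := (pvOcc_nil_iff xs x).mpr hx
      have hlast := h3 x
      rw [hnone] at hlast
      simp only [List.getLast?_nil] at hlast
      simp only [pvStepB, hlast]
      have hcont : (((PySem.List.enumerate xs 0).foldl pvStepB (PySem.Dict.empty, PySem.Dict.empty)).1).contains x = false := by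
        rw [← Bool.not_eq_true, PySem.Dict.contains_iff_mem_keys, h1, PySem.Set.mem_ofList]
        exact hx
      refine ⟨?_, fun e => ?_, fun e => ?_⟩
      · show (PySem.Dict.insert _ x _).keys = _
        rw [PySem.Dict.keys_insert_of_not_contains _ _ hcont, h1,
          PySem.Set.ofList_append_singleton,
          PySem.Set.add_of_not_mem (fun hh => hx ((PySem.Set.mem_ofList xs x).mp hh))]
      · show (PySem.Dict.insert _ x _).getD e _ = _
        rw [PySem.Dict.getD_insert, pvOcc_append]
        by_cases he : e = x
        · subst he
          rw [if_pos rfl, if_pos rfl, hnone]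
          rw [pvInner_small _ (by simp)]
        · rw [if_neg he, if_neg (fun hh => he hh.symm), List.append_nil, h2]
      · show (PySem.Dict.insert _ x _).get? e = _
        rw [PySem.Dict.get?_insert, pvOcc_append]
        by_cases he : e = x
        · subst he
          rw [if_pos rfl, if_pos rfl, hnone, List.nil_append, zero_add]
          rfl
        · rw [if_neg he, if_neg (fun hh => he hh.symm), List.append_nil, h3]

theorem pv_update_of_subset (s : PySem.Set String) (l : List String) (h : ∀ x ∈ l, x ∈ s) :
    PySem.Set.update s l = s := by
  induction l generalizing s with
  | nil => rfl
  | cons a t ih =>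
    rw [PySem.Set.update_cons, PySem.Set.add_of_mem (h a (List.mem_cons_self))]
    exact ih s (fun x hx => h x (List.mem_cons_of_mem _ hx))

-- the inner fold of A's phase 3 at a fixed key k, seen from outside
theorem pv_innerfold_getD_ne (z : List (Int × Int)) (k e : String) (hne : e ≠ k)
    (d : PySem.Dict String (PySem.Dict Int (List Int))) :
    (z.foldl (fun diffs cp =>
        diffs.modify k PySem.Dict.empty
          (fun inner => inner.modify (cp.1 - cp.2) [] (fun l => l ++ [cp.2]))) d).getD e
        PySem.Dict.empty = d.getD e PySem.Dict.empty := by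
  induction z generalizing d with
  | nil => rfl
  | cons c t ih => rw [List.foldl_cons, ih, PySem.Dict.getD_modify, if_neg hne]

theorem pv_innerfold_getD_self (z : List (Int × Int)) (k : String)
    (d : PySem.Dict String (PySem.Dict Int (List Int))) :
    (z.foldl (fun diffs cp =>
        diffs.modify k PySem.Dict.empty
          (fun inner => inner.modify (cp.1 - cp.2) [] (fun l => l ++ [cp.2]))) d).getD k
        PySem.Dict.empty =
      z.foldl (fun v cp => v.modify (cp.1 - cp.2) [] (fun l => l ++ [cp.2]))
        (d.getD k PySem.Dict.empty) := by
  induction z generalizing d with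
  | nil => rfl
  | cons c t ih => rw [List.foldl_cons, ih, PySem.Dict.getD_modify_self, List.foldl_cons]

theorem pvStepA_keys (d : PySem.Dict String (PySem.Dict Int (List Int)))
    (ep : String × List Int) (h : ep.1 ∈ d.keys) : (pvStepA d ep).keys = d.keys := by
  unfold pvStepA
  split_ifs
  · rfl
  · rw [PySem.Dict.keys_foldl_modify_key _ (fun _ => ep.1)]
    refine pv_update_of_subset _ _ ?_
    intro x hx
    simp only [List.mem_map] at hx
    obtain ⟨c, -, rfl⟩ := hx
    exact h

-- A's phase 3 over a nodup key list pointwise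
theorem pvA3 (K : List String) (F : String → List Int)
    (d : PySem.Dict String (PySem.Dict Int (List Int)))
    (hnd : K.Nodup) (hsub : ∀ k ∈ K, k ∈ d.keys) :
    ((K.map (fun k => (k, F k))).foldl pvStepA d).keys = d.keys ∧
    ∀ e, ((K.map (fun k => (k, F k))).foldl pvStepA d).getD e PySem.Dict.empty =
      if e ∈ K then
        (if (F e).length < 2 then d.getD e PySem.Dict.empty
         else pvApply (F e) (d.getD e PySem.Dict.empty))
      else d.getD e PySem.Dict.empty := by
  induction K generalizing d with
  | nil => exact ⟨rfl, fun e => by simp⟩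
  | cons k t ih =>
    have hk : k ∈ d.keys := hsub k List.mem_cons_self
    have hkeys : (pvStepA d (k, F k)).keys = d.keys := pvStepA_keys d (k, F k) hk
    have hsub' : ∀ j ∈ t, j ∈ (pvStepA d (k, F k)).keys := by
      rw [hkeys]; exact fun j hj => hsub j (List.mem_cons_of_mem _ hj)
    obtain ⟨ih1, ih2⟩ := ih (pvStepA d (k, F k)) hnd.of_cons hsub'
    have hgd : ∀ e, (pvStepA d (k, F k)).getD e PySem.Dict.empty =
        if e = k then
          (if (F k).length < 2 then d.getD k PySem.Dict.empty
           else pvApply (F k) (d.getD k PySem.Dict.empty))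
        else d.getD e PySem.Dict.empty := by
      intro e
      unfold pvStepA
      by_cases he : e = k
      · subst he
        rw [if_pos rfl]
        split_ifs with h2
        · rfl
        · exact pv_innerfold_getD_self _ _ _
      · rw [if_neg he]
        split_ifs with h2
        · rfl
        · exact pv_innerfold_getD_ne _ _ _ he _
    constructor
    · rw [List.map_cons, List.foldl_cons, ih1, hkeys]
    · intro e
      rw [List.map_cons, List.foldl_cons, ih2 e]
      by_cases he : e = k
      · subst he
        rw [if_neg (List.nodup_cons.mp hnd).1, hgd e, if_pos rfl,
          if_pos (List.mem_cons_self)]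
      · by_cases het : e ∈ t
        · rw [if_pos het, if_pos (List.mem_cons_of_mem _ het), hgd e, if_neg he]
        · rw [if_neg het, if_neg (by simp [he, het]), hgd e, if_neg he]

-- phase 1: the indices dict
theorem pvA1 (xs : List String) :
    ((PySem.List.enumerate xs).foldl
      (fun d p => d.modify p.2 [] (fun l => l ++ [p.1])) PySem.Dict.empty).items =
    (PySem.Set.ofList xs).map (fun e => (e, pvOcc xs e)) := by
  have hkeys : ((PySem.List.enumerate xs).foldl
      (fun d p => d.modify p.2 [] (fun l => l ++ [p.1])) PySem.Dict.empty).keys =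
      PySem.Set.ofList xs := by
    rw [PySem.Dict.keys_foldl_modify_key (l := PySem.List.enumerate xs)
        (key := fun p => p.2) (d0 := ([] : List Int)) (f := fun _ p l => l ++ [p.1])
        (d := PySem.Dict.empty),
      PySem.Dict.keys_empty, PySem.Set.update_nil_left, PySem.List.map_snd_enumerate]
  have hnd : ((PySem.List.enumerate xs).foldl
      (fun d p => d.modify p.2 [] (fun l => l ++ [p.1])) PySem.Dict.empty).keys.Nodup := by
    rw [hkeys]; exact PySem.Set.nodup_ofList xs
  have hgd : ∀ e, ((PySem.List.enumerate xs).foldl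
      (fun d p => d.modify p.2 [] (fun l => l ++ [p.1])) PySem.Dict.empty).getD e [] =
      pvOcc xs e := by
    intro e
    have hm : (PySem.List.enumerate xs).foldl
        (fun d p => d.modify p.2 [] (fun l => l ++ [p.1])) PySem.Dict.empty =
        ((PySem.List.enumerate xs).map (fun p => (p.2, p.1))).foldl
          (fun d q => d.modify q.1 [] (fun l => l ++ [q.2])) PySem.Dict.empty := by
      rw [List.foldl_map]
    rw [hm, PySem.Dict.getD_foldl_modify_append, PySem.Dict.getD_empty, List.nil_append,
      List.filter_map, List.map_map, pvOcc]
    rfl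
  rw [PySem.Dict.items_eq_map_keys _ hnd [], hkeys]
  exact List.map_congr_left (fun e _ => by rw [hgd e])

-- phase 2: getD and keys of the comprehension-initialised dict
theorem pvA2_getD (l : List String) (d : PySem.Dict String (PySem.Dict Int (List Int))) (e : String) :
    (l.foldl (fun d k => d.insert k PySem.Dict.empty) d).getD e PySem.Dict.empty =
      if e ∈ l then PySem.Dict.empty else d.getD e PySem.Dict.empty := by
  induction l generalizing d with
  | nil => simp
  | cons a t ih =>
    rw [List.foldl_cons, ih, PySem.Dict.getD_insert]
    by_cases he : e ∈ t
    · simp [he]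
    · by_cases hea : e = a <;> simp [he, hea]

theorem pvA2_keys (xs : List String) :
    (xs.foldl (fun d k => d.insert k PySem.Dict.empty)
        (PySem.Dict.empty : PySem.Dict String (PySem.Dict Int (List Int)))).keys =
      PySem.Set.ofList xs := by
  rw [PySem.Dict.keys_foldl_insert xs (fun _ _ => PySem.Dict.empty) PySem.Dict.empty,
    PySem.Dict.keys_empty, PySem.Set.update_nil_left]

theorem A_eq_model (xs : List String) : determine_distances_between_patterns xs = pvModel xs := by
  show ((((PySem.List.enumerate xs).foldl
      (fun d p => d.modify p.2 [] (fun l => l ++ [p.1])) PySem.Dict.empty).items.foldl pvStepA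
      (xs.foldl (fun d e => d.insert e PySem.Dict.empty) PySem.Dict.empty)).items.map
        (fun q => (q.1, q.2.items))) = pvModel xs
  rw [pvA1]
  obtain ⟨hk, hg⟩ := pvA3 (PySem.Set.ofList xs) (pvOcc xs)
    (xs.foldl (fun d e => d.insert e PySem.Dict.empty) PySem.Dict.empty)
    (PySem.Set.nodup_ofList xs) (by rw [pvA2_keys]; exact fun k hk => hk)
  have hkeys := hk.trans (pvA2_keys xs)
  have hnd : ((((PySem.Set.ofList xs).map (fun e => (e, pvOcc xs e))).foldl pvStepA
      (xs.foldl (fun d e => d.insert e PySem.Dict.empty) PySem.Dict.empty)).keys).Nodup := by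
    rw [hkeys]; exact PySem.Set.nodup_ofList xs
  rw [PySem.Dict.items_eq_map_keys _ hnd PySem.Dict.empty, hkeys, List.map_map, pvModel]
  refine List.map_congr_left (fun e he => ?_)
  have hex : e ∈ xs := (PySem.Set.mem_ofList xs e).mp he
  have := hg e
  rw [if_pos he, pvA2_getD, if_pos hex] at this
  simp only [Function.comp]
  rw [this]
  by_cases hl : (pvOcc xs e).length < 2
  · rw [if_pos hl, pvInner_small _ hl]
  · rw [if_neg hl]; rfl

theorem B_eq_model (xs : List String) :
    determine_distances_between_patterns_alt xs = pvModel xs := by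
  show ((PySem.List.enumerate xs).foldl pvStepB
      (PySem.Dict.empty, PySem.Dict.empty)).1.items.map (fun q => (q.1, q.2.items)) = pvModel xs
  obtain ⟨h1, h2, h3⟩ := B_inv xs
  have hnd : (((PySem.List.enumerate xs).foldl pvStepB
      (PySem.Dict.empty, PySem.Dict.empty)).1.keys).Nodup := by
    rw [h1]; exact PySem.Set.nodup_ofList xs
  rw [PySem.Dict.items_eq_map_keys _ hnd PySem.Dict.empty, h1, List.map_map, pvModel]
  exact List.map_congr_left (fun e he => by simp only [Function.comp]; rw [h2 e])

-- ===== VERDICT (by name: the statement is the Claim_ definition above) =====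
theorem determine_distances_between_patterns_spec : Claim_equal_determine_distances_between_patterns := by
  intro elements _
  unfold Spec_determine_distances_between_patterns
  rw [A_eq_model, B_eq_model]
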